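-- pv_equiv track=rewrite | github.com/Jonggae/Algorithm_Practice | 백준/Silver/1652. 누울 자리를 찾아라/누울 자리를 찾아라.py | group_dots
-- ===== SOURCE A (Python) =====
-- def group_dots(row):
--     grouped = []
--     current_char = ''
--
--     for char in row:
--         if (char == '.'):
--             current_char += char
--         else:
--             if current_char:
--                 grouped.append(current_char)
--                 current_char = ''
--     if current_char:
--         grouped.append(current_char)
--     return grouped
-- ===== SOURCE B (Python) =====
-- def group_dots(row):
--     # idiomatic: blank out every non-dot, then let str.split() return the maximal dot runs
--     return ''.join(c if c == '.' else ' ' for c in row).split()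
-- ===== Notes on version B (the rewrite author's own statement) =====
-- stated objective: idiomatic
-- what changed: Replaces the manual scan with a running buffer and explicit flushes by mapping every non-dot character to a space and calling str.split(), which yields the maximal dot runs directly.
import Mathlib
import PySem

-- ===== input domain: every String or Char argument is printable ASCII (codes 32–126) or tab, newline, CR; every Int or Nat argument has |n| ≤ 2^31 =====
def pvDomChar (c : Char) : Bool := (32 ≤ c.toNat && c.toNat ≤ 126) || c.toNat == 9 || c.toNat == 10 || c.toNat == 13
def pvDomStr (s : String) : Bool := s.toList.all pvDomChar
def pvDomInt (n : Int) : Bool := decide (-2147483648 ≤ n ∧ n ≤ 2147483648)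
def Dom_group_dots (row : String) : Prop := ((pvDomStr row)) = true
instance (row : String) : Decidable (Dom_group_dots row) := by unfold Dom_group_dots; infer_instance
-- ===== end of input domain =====

-- B replaces A's buffer-and-flush scan by mapping non-dots to spaces and calling str.split(); same values, same cost.

-- ===== PORT A =====
-- one loop step of A: grow the buffer on '.', otherwise flush it if nonempty
def groupDotsStep (st : List String × String) (c : Char) : List String × String :=
  if c == '.' then (st.1, st.2.push c)
  else if st.2.isEmpty then st else (st.1 ++ [st.2], "")

def group_dots (row : String) : List String :=
  let st := row.toList.foldl groupDotsStep ([], "")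
  if st.2.isEmpty then st.1 else st.1 ++ [st.2]

-- ===== PORT B =====
def group_dots_alt (row : String) : List String :=
  PySem.Str.split₀ (String.ofList (row.toList.map (fun c => if c == '.' then c else ' ')))

-- ===== PRECONDITION & SPEC =====
def Spec_group_dots (row : String) (out : List String) : Prop := out = group_dots_alt row
instance (row : String) (out : List String) : Decidable (Spec_group_dots row out) := by unfold Spec_group_dots; infer_instance

-- ===== CLAIM (what is proved, stated in full; the proofs are below) =====
def Claim_equal_group_dots : Prop := ∀ (row : String), Dom_group_dots row → Spec_group_dots row (group_dots row)

-- ===== LEMMAS AND PROOFS =====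

theorem ofList_push (l : List Char) (c : Char) :
    (String.ofList l).push c = String.ofList (l ++ [c]) := by
  apply String.toList_injective; simp

theorem ofList_isEmpty_true : (String.ofList ([] : List Char)).isEmpty = true := by
  decide

theorem ofList_isEmpty_false (l : List Char) (h : l ≠ []) :
    (String.ofList l).isEmpty = false := by
  rw [Bool.eq_false_iff]
  intro hc
  exact h (by simpa using String.isEmpty_iff.mp hc)

-- the invariant tying A's forward (groups, buffer) state to split₀.go's reversed (cur, acc) state
theorem groupDots_go (cs : List Char) : ∀ (g : List String) (cur : List Char),
    (let st := cs.foldl groupDotsStep (g, String.ofList cur)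
     if st.2.isEmpty then st.1 else st.1 ++ [st.2]) =
    (PySem.Chars.split₀.go (cs.map (fun c => if c == '.' then c else ' '))
      cur.reverse ((g.map String.toList).reverse)).map String.ofList := by
  induction cs with
  | nil =>
    intro g cur
    simp only [List.foldl_nil, PySem.Chars.split₀.go, List.map_nil]
    by_cases h : cur = []
    · subst h
      simp [ofList_isEmpty_true, Function.comp_def]
    · rw [ofList_isEmpty_false cur h]
      simp [List.isEmpty_iff, h, Function.comp_def]
  | cons c cs ih =>
    intro g cur
    by_cases hc : c = '.'
    · subst hc
      simp only [List.foldl_cons, List.map_cons, groupDotsStep, beq_self_eq_true,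
        if_true, ofList_push, PySem.Chars.split₀.go]
      have hsp : PySem.Chars.isspace '.' = false := by decide
      rw [hsp]
      simpa using ih g (cur ++ ['.'])
    · have hb : (c == '.') = false := by simp [hc]
      have hsp : PySem.Chars.isspace ' ' = true := by decide
      by_cases h : cur = []
      · subst h
        simp only [List.foldl_cons, List.map_cons, groupDotsStep, hb, Bool.false_eq_true,
          if_false, PySem.Chars.split₀.go, hsp, if_true, ofList_isEmpty_true,
          List.reverse_nil, List.isEmpty_nil]
        simpa using ih g []
      · simp only [List.foldl_cons, List.map_cons, groupDotsStep, hb, Bool.false_eq_true,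
          if_false, ofList_isEmpty_false cur h, PySem.Chars.split₀.go, hsp, if_true,
          List.isEmpty_iff, List.reverse_eq_nil_iff]
        rw [if_neg h]
        have := ih (g ++ [String.ofList cur]) []
        simpa using this

-- ===== VERDICT (by name: the statement is the Claim_ definition above) =====
theorem group_dots_spec : Claim_equal_group_dots := by
  intro row _
  unfold Spec_group_dots group_dots group_dots_alt PySem.Str.split₀ PySem.Chars.split₀
  have := groupDots_go row.toList [] []
  simp only [String.ofList_nil] at this
  simpa using this
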